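-- pv_equiv track=rewrite | github.com/maemreyo/zmr-ctx-paker | src/context_packer/chunker/chunker.py | _python_indent_end
-- ===== SOURCE A (Python) =====
-- from typing import List, Optional, Set
--
-- def _python_indent_end(lines: List[str], start_line_0: int) -> int:
--     if start_line_0 >= len(lines):
--         return len(lines)
--     def_line = lines[start_line_0]
--     base_indent = len(def_line) - len(def_line.lstrip())
--     last_body_line = start_line_0
--     for i in range(start_line_0 + 1, len(lines)):
--         stripped = lines[i].strip()
--         if not stripped or stripped.startswith('#'):
--             continue
--         indent = len(lines[i]) - len(lines[i].lstrip())
--         if indent <= base_indent: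
--             break
--         last_body_line = i
--     return last_body_line + 1  # 1-indexed
-- ===== SOURCE B (Python) =====
-- def _python_indent_end(lines, start_line_0):
--     n = len(lines)
--     if start_line_0 >= n:
--         return n
--     def_line = lines[start_line_0]
--     base_indent = len(def_line) - len(def_line.lstrip())
--     end = n
--     for i in range(start_line_0 + 1, n):
--         stripped = lines[i].strip()
--         if stripped and not stripped.startswith('#') and len(lines[i]) - len(lines[i].lstrip()) <= base_indent:
--             end = i
--             break
--     for j in reversed(range(start_line_0 + 1, end)):
--         stripped = lines[j].strip()
--         if stripped and not stripped.startswith('#'):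
--             return j + 1
--     return start_line_0 + 1
-- ===== Notes on version B (the rewrite author's own statement) =====
-- stated objective: alternative
-- what changed: A's single forward scan carrying a last-significant-body-line accumulator is replaced by a two-phase decomposition: first locate the block boundary (first significant line with indent <= base), then scan backward from it to trim trailing blanks/comments and return the first significant line found.
import Mathlib
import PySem

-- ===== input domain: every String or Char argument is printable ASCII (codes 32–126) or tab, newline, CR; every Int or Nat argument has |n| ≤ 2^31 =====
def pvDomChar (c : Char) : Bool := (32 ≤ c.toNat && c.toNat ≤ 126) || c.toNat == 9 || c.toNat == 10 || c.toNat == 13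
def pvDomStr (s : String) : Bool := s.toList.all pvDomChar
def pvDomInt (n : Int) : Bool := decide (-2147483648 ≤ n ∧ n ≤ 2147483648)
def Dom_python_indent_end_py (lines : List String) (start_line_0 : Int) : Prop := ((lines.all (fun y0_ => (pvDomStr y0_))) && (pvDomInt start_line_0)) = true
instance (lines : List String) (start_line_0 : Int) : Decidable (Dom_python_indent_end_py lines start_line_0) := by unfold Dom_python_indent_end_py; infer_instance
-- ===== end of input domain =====

-- B replaces A's single forward scan carrying a last-body-line accumulator by a two-phase
-- decomposition (find the block boundary, then trim trailing blanks/comments backward); same cost.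

-- ===== PORT A =====
-- significance test shared by both ports: line strips to something nonempty not starting with '#'
def pvSig (l : String) : Bool :=
  let st := PySem.Str.strip l
  !(st == "") && !(PySem.Str.startswith st "#")

-- indent = len(line) - len(line.lstrip())
def pvIndent (l : String) : Int :=
  PySem.Str.len l - PySem.Str.len (PySem.Str.lstrip l)

-- A's forward loop over the index range, carrying last_body_line; break = return accumulator
def pvLoopA (lines : List String) (base : Int) : List Int → Int → Int
  | [], last => last
  | i :: rest, last =>
    match PySem.List.pyGet? lines i with
    | none => last  -- IndexError: unreachable, every index of the range is in bounds under Pre_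
    | some li =>
      if pvSig li then
        if pvIndent li ≤ base then last  -- break
        else pvLoopA lines base rest i
      else pvLoopA lines base rest last  -- continue

def python_indent_end_py (lines : List String) (start_line_0 : Int) : Int :=
  if start_line_0 ≥ (lines.length : Int) then (lines.length : Int)
  else
    match PySem.List.pyGet? lines start_line_0 with
    | none => 0  -- IndexError on lines[start_line_0]: excluded by Pre_
    | some def_line =>
      let base_indent := pvIndent def_line
      pvLoopA lines base_indent
        (PySem.List.pyRange (start_line_0 + 1) (lines.length : Int) 1) start_line_0 + 1

-- ===== PORT B =====
-- B phase 1: first index whose line is significant with indent ≤ base (the boundary), else dflt = len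
def pvLoopB1 (lines : List String) (base : Int) (dflt : Int) : List Int → Int
  | [] => dflt
  | i :: rest =>
    match PySem.List.pyGet? lines i with
    | none => dflt  -- IndexError: unreachable under Pre_
    | some li =>
      if pvSig li && decide (pvIndent li ≤ base) then i
      else pvLoopB1 lines base dflt rest

-- B phase 2: over reversed(range(start+1, end)), first significant line
def pvLoopB2 (lines : List String) : List Int → Option Int
  | [] => none
  | j :: rest =>
    match PySem.List.pyGet? lines j with
    | none => none  -- IndexError: unreachable under Pre_
    | some lj => if pvSig lj then some j else pvLoopB2 lines rest

def python_indent_end_py_alt (lines : List String) (start_line_0 : Int) : Int :=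
  if start_line_0 ≥ (lines.length : Int) then (lines.length : Int)
  else
    match PySem.List.pyGet? lines start_line_0 with
    | none => 0  -- IndexError on lines[start_line_0]: excluded by Pre_
    | some def_line =>
      let base_indent := pvIndent def_line
      let e := pvLoopB1 lines base_indent (lines.length : Int)
        (PySem.List.pyRange (start_line_0 + 1) (lines.length : Int) 1)
      match pvLoopB2 lines ((PySem.List.pyRange (start_line_0 + 1) e 1).reverse) with
      | some j => j + 1
      | none => start_line_0 + 1

-- ===== PRECONDITION & SPEC =====
-- A raises IndexError on lines[start_line_0] exactly when start_line_0 < -len(lines)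
-- (and start_line_0 < len(lines)); Pre_ excludes exactly those inputs. Nothing else is excluded.
def Pre_python_indent_end_py (lines : List String) (start_line_0 : Int) : Prop :=
  -(lines.length : Int) ≤ start_line_0
instance (lines : List String) (start_line_0 : Int) : Decidable (Pre_python_indent_end_py lines start_line_0) := by unfold Pre_python_indent_end_py; infer_instance

def pvWitness_python_indent_end_py : List String × Int :=
  (["def f():", "    x = 1", "", "y"], 0)

def Spec_python_indent_end_py (lines : List String) (start_line_0 : Int) (out : Int) : Prop := out = python_indent_end_py_alt lines start_line_0
instance (lines : List String) (start_line_0 : Int) (out : Int) : Decidable (Spec_python_indent_end_py lines start_line_0 out) := by unfold Spec_python_indent_end_py; infer_instance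

-- ===== CLAIM (what is proved, stated in full; the proofs are below) =====
def Claim_equal_python_indent_end_py : Prop := ∀ (lines : List String) (start_line_0 : Int), Dom_python_indent_end_py lines start_line_0 → Pre_python_indent_end_py lines start_line_0 → Spec_python_indent_end_py lines start_line_0 (python_indent_end_py lines start_line_0)

-- ===== LEMMAS AND PROOFS =====

-- index-level significance / non-boundary predicates (proof helpers only)
def pvSigI (lines : List String) (i : Int) : Bool :=
  match PySem.List.pyGet? lines i with
  | some l => pvSig l
  | none => false

def pvNB (lines : List String) (base : Int) (i : Int) : Bool :=
  match PySem.List.pyGet? lines i with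
  | some l => !(pvSig l && decide (pvIndent l ≤ base))
  | none => false

theorem pvGet_isSome (xs : List String) (i : Int)
    (h : -(xs.length : Int) ≤ i) (h2 : i < (xs.length : Int)) :
    (PySem.List.pyGet? xs i).isSome := by
  unfold PySem.List.pyGet? PySem.List.pyIdx?
  split
  · simp_all
  · simp_all; omega

-- A's loop returns the last significant index of the non-boundary prefix (default: the accumulator)
theorem pvLoopA_char (lines : List String) (base : Int) :
    ∀ (R : List Int) (last : Int), (∀ i ∈ R, (PySem.List.pyGet? lines i).isSome) →
    pvLoopA lines base R last
      = (((R.takeWhile (pvNB lines base)).filter (pvSigI lines)).getLast?).getD last := by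
  intro R
  induction R with
  | nil => intro last _; simp [pvLoopA]
  | cons i rest ih =>
    intro last h
    obtain ⟨l, hl⟩ := Option.isSome_iff_exists.mp (h i (by simp))
    have hrest : ∀ j ∈ rest, (PySem.List.pyGet? lines j).isSome := fun j hj => h j (by simp [hj])
    cases hps : pvSig l with
    | false =>
      have hnb : pvNB lines base i = true := by simp [pvNB, hl, hps]
      have hsi : pvSigI lines i = false := by simp [pvSigI, hl, hps]
      simp only [pvLoopA, hl, hps, Bool.false_eq_true, if_false, List.takeWhile_cons,
        hnb, if_true, List.filter_cons, hsi]
      exact ih last hrest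
    | true =>
      by_cases hpi : pvIndent l ≤ base
      · have hnb : pvNB lines base i = false := by simp [pvNB, hl, hps, hpi]
        simp [pvLoopA, hl, hps, hpi, hnb]
      · have hnb : pvNB lines base i = true := by simp [pvNB, hl, hps, hpi]
        have hsi : pvSigI lines i = true := by simp [pvSigI, hl, hps]
        simp only [pvLoopA, hl, hps, if_true, hpi, if_false, List.takeWhile_cons, hnb,
          List.filter_cons, hsi]
        rw [ih i hrest, List.getLast?_cons]
        simp
-- B's phase-2 loop is find? of the significance predicate
theorem pvLoopB2_char (lines : List String) :
    ∀ (L : List Int), (∀ j ∈ L, (PySem.List.pyGet? lines j).isSome) →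
    pvLoopB2 lines L = L.find? (pvSigI lines) := by
  intro L
  induction L with
  | nil => intro _; simp [pvLoopB2]
  | cons j rest ih =>
    intro h
    obtain ⟨l, hl⟩ := Option.isSome_iff_exists.mp (h j (by simp))
    have hrest : ∀ k ∈ rest, (PySem.List.pyGet? lines k).isSome := fun k hk => h k (by simp [hk])
    have hsi : pvSigI lines j = pvSig l := by simp [pvSigI, hl]
    cases hps : pvSig l with
    | true => simp [pvLoopB2, hl, hps, hsi]
    | false =>
      simp only [pvLoopB2, hl, hps, Bool.false_eq_true, if_false, List.find?_cons, hsi]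
      exact ih hrest
-- B's phase-1 result lies between a and b
theorem pvLoopB1_bounds (lines : List String) (base : Int) :
    ∀ (a b : Int), a ≤ b →
    a ≤ pvLoopB1 lines base b (PySem.List.pyRange a b 1)
      ∧ pvLoopB1 lines base b (PySem.List.pyRange a b 1) ≤ b := by
  intro a b hab
  by_cases hba : b ≤ a
  · rw [PySem.List.pyRange_one_eq_nil hba]
    simp only [pvLoopB1]; omega
  · have hlt : a < b := by omega
    have hterm : (b - (a + 1)).toNat < (b - a).toNat := by omega
    rw [PySem.List.pyRange_one_cons hlt]
    simp only [pvLoopB1]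
    split
    · omega
    · split_ifs with hc
      · omega
      · have := pvLoopB1_bounds lines base (a + 1) b (by omega)
        omega
termination_by a b => (b - a).toNat
-- the non-boundary prefix of the range is exactly the range up to B's boundary
theorem pvTakeWhile_range (lines : List String) (base : Int) :
    ∀ (a b : Int), (∀ i, a ≤ i → i < b → (PySem.List.pyGet? lines i).isSome) →
    (PySem.List.pyRange a b 1).takeWhile (pvNB lines base)
      = PySem.List.pyRange a (pvLoopB1 lines base b (PySem.List.pyRange a b 1)) 1 := by
  intro a b h
  by_cases hba : b ≤ a
  · rw [PySem.List.pyRange_one_eq_nil hba]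
    simp only [pvLoopB1, List.takeWhile_nil]
    exact (PySem.List.pyRange_one_eq_nil hba).symm
  · have hlt : a < b := by omega
    have hterm : (b - (a + 1)).toNat < (b - a).toNat := by omega
    obtain ⟨l, hl⟩ := Option.isSome_iff_exists.mp (h a (by omega) hlt)
    rw [PySem.List.pyRange_one_cons hlt]
    simp only [pvLoopB1, hl, List.takeWhile_cons]
    cases hc : (pvSig l && decide (pvIndent l ≤ base)) with
    | true =>
      have hnb : pvNB lines base a = false := by simp [pvNB, hl, hc]
      rw [if_neg (by simp [hnb]), if_pos rfl, PySem.List.pyRange_one_eq_nil (le_refl a)]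
    | false =>
      have hnb : pvNB lines base a = true := by simp [pvNB, hl, hc]
      rw [if_pos hnb, if_neg (by simp)]
      have hbnd := pvLoopB1_bounds lines base (a + 1) b (by omega)
      rw [pvTakeWhile_range lines base (a + 1) b (fun i hi hi2 => h i (by omega) hi2)]
      rw [PySem.List.pyRange_one_cons
        (show a < pvLoopB1 lines base b (PySem.List.pyRange (a + 1) b 1) by omega)]
termination_by a b => (b - a).toNat

-- ===== VERDICT (by name: the statement is the Claim_ definition above) =====
theorem python_indent_end_py_spec : Claim_equal_python_indent_end_py := by
  intro lines s _ hpre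
  unfold Spec_python_indent_end_py python_indent_end_py python_indent_end_py_alt
  by_cases hge : s ≥ (lines.length : Int)
  · rw [if_pos hge, if_pos hge]
  · rw [if_neg hge, if_neg hge]
    have hpre' : -(lines.length : Int) ≤ s := hpre
    obtain ⟨def_line, hdl⟩ := Option.isSome_iff_exists.mp
      (pvGet_isSome lines s hpre' (by omega))
    simp only [hdl]
    have hRsome : ∀ i, s + 1 ≤ i → i < (lines.length : Int) →
        (PySem.List.pyGet? lines i).isSome := by
      intro i h1 h2; exact pvGet_isSome lines i (by omega) h2
    have hRmem : ∀ i ∈ PySem.List.pyRange (s + 1) (lines.length : Int) 1,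
        (PySem.List.pyGet? lines i).isSome := by
      intro i hi
      rw [PySem.List.mem_pyRange_one] at hi
      exact hRsome i hi.1 hi.2
    have hbnd := pvLoopB1_bounds lines (pvIndent def_line) (s + 1) (lines.length : Int)
      (by omega)
    have hEsome : ∀ j ∈ (PySem.List.pyRange (s + 1)
        (pvLoopB1 lines (pvIndent def_line) (lines.length : Int)
          (PySem.List.pyRange (s + 1) (lines.length : Int) 1)) 1).reverse,
        (PySem.List.pyGet? lines j).isSome := by
      intro j hj
      rw [List.mem_reverse, PySem.List.mem_pyRange_one] at hj
      exact hRsome j hj.1 (by omega)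
    rw [pvLoopA_char lines (pvIndent def_line) _ s hRmem,
      pvTakeWhile_range lines (pvIndent def_line) (s + 1) (lines.length : Int) hRsome,
      pvLoopB2_char lines _ hEsome, ← List.getLast?_filter]
    cases hlast : ((PySem.List.pyRange (s + 1)
        (pvLoopB1 lines (pvIndent def_line) (lines.length : Int)
          (PySem.List.pyRange (s + 1) (lines.length : Int) 1)) 1).filter
            (pvSigI lines)).getLast? with
    | none => simp
    | some j => simp
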